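-- pv_equiv track=rewrite | github.com/akodoreign/Tower-Bot | src/mission_outcomes.py | _fuzzy_find_npc
-- ===== SOURCE A (Python) =====
-- from typing import Dict, List, Optional
--
-- def _fuzzy_find_npc(name: str, npcs: List[Dict]) -> Optional[Dict]:
--     """Find an NPC by fuzzy name match (case-insensitive, partial)."""
--     name_lower = name.strip().lower()
--     # Exact match first
--     for n in npcs:
--         if n.get("name", "").lower() == name_lower:
--             return n
--     # Partial match
--     for n in npcs:
--         npc_name = n.get("name", "").lower()
--         if name_lower in npc_name or npc_name in name_lower:
--             return n
--     return None
-- ===== SOURCE B (Python) =====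
-- from typing import Dict, List, Optional
--
-- def _fuzzy_find_npc(name: str, npcs: List[Dict]) -> Optional[Dict]:
--     """Single pass: return the first exact (case-insensitive) match immediately;
--     remember the first partial match as a fallback."""
--     name_lower = name.strip().lower()
--     first_partial = None
--     for n in npcs:
--         npc_name = n.get("name", "").lower()
--         if npc_name == name_lower:
--             return n
--         if first_partial is None and (name_lower in npc_name or npc_name in name_lower):
--             first_partial = n
--     return first_partial
-- ===== Notes on version B (the rewrite author's own statement) =====
-- stated objective: alternative
-- what changed: Two sequential scans (exact match pass, then partial match pass) are replaced by a single pass that returns an exact match immediately and keeps the first partial match in an accumulator returned after the loop.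
import Mathlib
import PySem

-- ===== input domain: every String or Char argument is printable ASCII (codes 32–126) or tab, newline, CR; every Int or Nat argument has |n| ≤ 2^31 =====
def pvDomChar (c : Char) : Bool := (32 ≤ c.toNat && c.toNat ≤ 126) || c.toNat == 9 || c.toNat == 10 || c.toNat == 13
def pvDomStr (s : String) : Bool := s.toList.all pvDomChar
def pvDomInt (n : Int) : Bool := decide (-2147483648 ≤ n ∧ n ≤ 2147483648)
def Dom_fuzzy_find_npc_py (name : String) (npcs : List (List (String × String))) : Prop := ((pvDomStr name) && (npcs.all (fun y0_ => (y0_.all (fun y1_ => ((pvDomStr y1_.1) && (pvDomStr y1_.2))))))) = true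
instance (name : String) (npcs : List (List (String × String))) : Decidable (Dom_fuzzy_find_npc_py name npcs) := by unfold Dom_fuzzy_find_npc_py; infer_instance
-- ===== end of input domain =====

-- B changes A's two sequential scans into one pass with a first-partial accumulator; same return value (objective: alternative).

-- ===== PORT A =====
-- n.get("name", "").lower()
def pvNpcName (n : List (String × String)) : String :=
  PySem.Str.lower ((PySem.Dict.mk n).getD "name" "")

-- literal port of A: first loop = first exact match, second loop = first partial match
def fuzzy_find_npc_py (name : String) (npcs : List (List (String × String))) : Option (List (String × String)) :=
  let name_lower := PySem.Str.lower (PySem.Str.strip name)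
  match npcs.find? (fun n => pvNpcName n == name_lower) with
  | some n => some n
  | none =>
      npcs.find? (fun n =>
        let npc_name := pvNpcName n
        PySem.Str.isIn name_lower npc_name || PySem.Str.isIn npc_name name_lower)

-- ===== PORT B =====
-- single pass: return exact match at once, keep the first partial match as fallback
def pvAltLoop (name_lower : String) :
    List (List (String × String)) → Option (List (String × String)) → Option (List (String × String))
  | [], first_partial => first_partial
  | n :: rest, first_partial =>
      let npc_name := pvNpcName n
      if npc_name == name_lower then some n
      else
        pvAltLoop name_lower rest
          (if first_partial.isNone &&
              (PySem.Str.isIn name_lower npc_name || PySem.Str.isIn npc_name name_lower)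
           then some n else first_partial)

def fuzzy_find_npc_py_alt (name : String) (npcs : List (List (String × String))) : Option (List (String × String)) :=
  pvAltLoop (PySem.Str.lower (PySem.Str.strip name)) npcs none

-- ===== PRECONDITION & SPEC =====
def Spec_fuzzy_find_npc_py (name : String) (npcs : List (List (String × String))) (out : Option (List (String × String))) : Prop := out = fuzzy_find_npc_py_alt name npcs
instance (name : String) (npcs : List (List (String × String))) (out : Option (List (String × String))) : Decidable (Spec_fuzzy_find_npc_py name npcs out) := by unfold Spec_fuzzy_find_npc_py; infer_instance

-- ===== CLAIM (what is proved, stated in full; the proofs are below) =====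
def Claim_equal_fuzzy_find_npc_py : Prop := ∀ (name : String) (npcs : List (List (String × String))), Dom_fuzzy_find_npc_py name npcs → Spec_fuzzy_find_npc_py name npcs (fuzzy_find_npc_py name npcs)

-- ===== LEMMAS AND PROOFS =====

-- loop invariant: the single pass returns the first exact match if any, else the
-- remembered partial (if already set), else the first partial match in the rest
theorem pvAltLoop_eq (nl : String) (l : List (List (String × String)))
    (fp : Option (List (String × String))) :
    pvAltLoop nl l fp =
      match l.find? (fun n => pvNpcName n == nl) with
      | some n => some n
      | none =>
          match fp with
          | some x => some x
          | none =>
              l.find? (fun n =>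
                PySem.Str.isIn nl (pvNpcName n) || PySem.Str.isIn (pvNpcName n) nl) := by
  induction l generalizing fp with
  | nil => cases fp <;> simp [pvAltLoop]
  | cons n rest ih =>
    by_cases hx : pvNpcName n == nl
    · simp [pvAltLoop, hx, List.find?]
    · rw [show pvAltLoop nl (n :: rest) fp = pvAltLoop nl rest
          (if fp.isNone && (PySem.Str.isIn nl (pvNpcName n) || PySem.Str.isIn (pvNpcName n) nl)
           then some n else fp) from by simp [pvAltLoop, hx]]
      rw [ih]
      simp only [List.find?, hx]
      cases rest.find? (fun n => pvNpcName n == nl) with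
      | some m =>
        cases fp <;>
          cases ha : PySem.Chars.isIn nl.toList (pvNpcName n).toList <;>
          cases hb : PySem.Chars.isIn (pvNpcName n).toList nl.toList <;>
          simp [ha, hb]
      | none =>
        cases fp <;>
          cases ha : PySem.Chars.isIn nl.toList (pvNpcName n).toList <;>
          cases hb : PySem.Chars.isIn (pvNpcName n).toList nl.toList <;>
          simp [ha, hb]

-- ===== VERDICT (by name: the statement is the Claim_ definition above) =====
theorem fuzzy_find_npc_py_spec : Claim_equal_fuzzy_find_npc_py := by
  intro name npcs _
  unfold Spec_fuzzy_find_npc_py fuzzy_find_npc_py fuzzy_find_npc_py_alt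
  rw [pvAltLoop_eq]
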